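-- pv_equiv track=rewrite | github.com/RajaYehia/QuantumCity | QuantumCity.py | Sifting3
-- ===== SOURCE A (Python) =====
-- def Sifting3(L1,L2,L3):
--     #Function to get the number of matching received qubit for 4 qubit
--     Lres = []
--     for i in range(len(L1)):
--         ta, ma = L1[i]
--         for j in range(len(L2)):
--             tb, mb = L2[j]
--             if ta == tb:
--                 for k in range(len(L3)):
--                     tc, mc = L3[k]
--                     if tb == tc:
--                         Lres.append((ma,mb,mc))
--     return Lres
-- ===== SOURCE B (Python) =====
-- def Sifting3(L1, L2, L3):
--     g2 = {}
--     for t, m in L2: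
--         g2.setdefault(t, []).append(m)
--     g3 = {}
--     for t, m in L3:
--         g3.setdefault(t, []).append(m)
--     Lres = []
--     for ta, ma in L1:
--         for mb in g2.get(ta, []):
--             for mc in g3.get(ta, []):
--                 Lres.append((ma, mb, mc))
--     return Lres
-- ===== Notes on version B (the rewrite author's own statement) =====
-- stated objective: faster
-- what changed: Replaces the triple nested scan with dicts grouping L2 and L3 values by key built in one pass each, then emits the cross-product per L1 element.
import Mathlib
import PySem

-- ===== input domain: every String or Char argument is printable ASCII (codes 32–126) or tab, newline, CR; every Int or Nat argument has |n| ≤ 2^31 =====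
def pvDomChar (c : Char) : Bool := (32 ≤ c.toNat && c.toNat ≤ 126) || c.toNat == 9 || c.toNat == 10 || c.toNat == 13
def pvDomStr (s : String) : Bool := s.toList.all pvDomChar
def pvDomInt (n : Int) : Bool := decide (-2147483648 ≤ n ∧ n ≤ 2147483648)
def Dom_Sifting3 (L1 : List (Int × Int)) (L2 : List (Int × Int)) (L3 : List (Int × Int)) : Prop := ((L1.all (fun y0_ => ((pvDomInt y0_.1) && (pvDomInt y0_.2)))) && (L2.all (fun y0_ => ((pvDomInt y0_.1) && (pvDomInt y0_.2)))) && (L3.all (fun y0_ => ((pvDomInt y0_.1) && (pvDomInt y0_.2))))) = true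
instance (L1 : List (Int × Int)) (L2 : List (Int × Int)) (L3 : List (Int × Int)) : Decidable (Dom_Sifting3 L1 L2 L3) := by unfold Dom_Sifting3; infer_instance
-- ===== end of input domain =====

-- B replaces A's triple nested scan by one-pass grouping dicts plus per-key cross products (asymptotically faster).

-- ===== PORT A =====
-- literal port of A: three nested loops, appending (ma, mb, mc) on each double key match
def Sifting3 (L1 : List (Int × Int)) (L2 : List (Int × Int)) (L3 : List (Int × Int)) : List (Int × Int × Int) :=
  L1.foldl (fun acc p1 =>
    L2.foldl (fun acc p2 =>
      if p1.1 = p2.1 then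
        L3.foldl (fun acc p3 =>
          if p2.1 = p3.1 then acc ++ [(p1.2, p2.2, p3.2)] else acc) acc
      else acc) acc) []

-- ===== PORT B =====
-- grouping loop of Source B: g.setdefault(t, []).append(m)
def pvGroup (L : List (Int × Int)) : PySem.Dict Int (List Int) :=
  L.foldl (fun d p => d.modify p.1 [] (· ++ [p.2])) PySem.Dict.empty

def Sifting3_alt (L1 : List (Int × Int)) (L2 : List (Int × Int)) (L3 : List (Int × Int)) : List (Int × Int × Int) :=
  let g2 := pvGroup L2
  let g3 := pvGroup L3
  L1.foldl (fun acc p1 =>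
    (g2.getD p1.1 []).foldl (fun acc mb =>
      (g3.getD p1.1 []).foldl (fun acc mc => acc ++ [(p1.2, mb, mc)]) acc) acc) []

-- ===== PRECONDITION & SPEC =====
def Spec_Sifting3 (L1 : List (Int × Int)) (L2 : List (Int × Int)) (L3 : List (Int × Int)) (out : List (Int × Int × Int)) : Prop := out = Sifting3_alt L1 L2 L3
instance (L1 : List (Int × Int)) (L2 : List (Int × Int)) (L3 : List (Int × Int)) (out : List (Int × Int × Int)) : Decidable (Spec_Sifting3 L1 L2 L3 out) := by unfold Spec_Sifting3; infer_instance

-- ===== CLAIM (what is proved, stated in full; the proofs are below) =====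
def Claim_equal_Sifting3 : Prop := ∀ (L1 : List (Int × Int)) (L2 : List (Int × Int)) (L3 : List (Int × Int)), Dom_Sifting3 L1 L2 L3 → Spec_Sifting3 L1 L2 L3 (Sifting3 L1 L2 L3)

-- ===== LEMMAS AND PROOFS =====

-- the grouped value list of key t is exactly the t-keyed values of L, in order
theorem pvGroup_getD (L : List (Int × Int)) (t : Int) :
    (pvGroup L).getD t [] = (L.filter (fun p => p.1 == t)).map (·.2) := by
  simpa [pvGroup] using
    PySem.Dict.getD_foldl_modify_append (l := L) (d := PySem.Dict.empty) (c := t)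

-- flatMap over a filtered list = flatMap with an if
theorem pvFlatMap_filter {α β : Type} (q : α → Bool) (g : α → List β) (l : List α) :
    (l.filter q).flatMap g = l.flatMap (fun x => if q x then g x else []) := by
  induction l with
  | nil => rfl
  | cons x xs ih => by_cases h : q x <;> simp [h, ih]

-- the common normal form of both programs
def pvJoin (L1 L2 L3 : List (Int × Int)) : List (Int × Int × Int) :=
  L1.flatMap (fun p1 =>
    L2.flatMap (fun p2 =>
      if p1.1 = p2.1 then
        ((L3.filter (fun p => p.1 == p1.1)).map (·.2)).map (fun mc => (p1.2, p2.2, mc))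
      else []))

theorem Sifting3_eq_pvJoin (L1 L2 L3 : List (Int × Int)) :
    Sifting3 L1 L2 L3 = pvJoin L1 L2 L3 := by
  unfold Sifting3 pvJoin
  have hmid : ∀ (p1 : Int × Int) (acc : List (Int × Int × Int)),
      L2.foldl (fun acc p2 =>
        if p1.1 = p2.1 then
          L3.foldl (fun acc p3 =>
            if p2.1 = p3.1 then acc ++ [(p1.2, p2.2, p3.2)] else acc) acc
        else acc) acc
      = acc ++ L2.flatMap (fun p2 =>
          if p1.1 = p2.1 then
            ((L3.filter (fun p => p.1 == p1.1)).map (·.2)).map (fun mc => (p1.2, p2.2, mc))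
          else []) := by
    intro p1 acc
    rw [PySem.List.foldl_congr_mem L2 _
      (fun acc p2 => acc ++ (if p1.1 = p2.1 then
        ((L3.filter (fun p => p.1 == p1.1)).map (·.2)).map (fun mc => (p1.2, p2.2, mc)) else [])) acc
      ?_, PySem.List.foldl_append_eq_flatMap]
    intro acc p2 _
    by_cases h : p1.1 = p2.1
    · have hf : (fun p : Int × Int => decide (p2.1 = p.1)) = (fun p => p.1 == p1.1) := by
        funext p
        rw [← h, Bool.eq_iff_iff]
        constructor <;> intro hh <;> simp_all
      simp only [if_pos h]
      rw [PySem.List.foldl_append_ite (p := fun p3 : Int × Int => p2.1 = p3.1)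
          (f := fun p3 : Int × Int => (p1.2, p2.2, p3.2)) L3 acc, hf, List.map_map]
      rfl
    · simp [h]
  rw [PySem.List.foldl_congr_mem L1 _
      (fun acc p1 => acc ++ L2.flatMap (fun p2 =>
        if p1.1 = p2.1 then
          ((L3.filter (fun p => p.1 == p1.1)).map (·.2)).map (fun mc => (p1.2, p2.2, mc))
        else [])) []
      (fun acc p1 _ => hmid p1 acc), PySem.List.foldl_append_eq_flatMap, List.nil_append]

theorem Sifting3_alt_eq_pvJoin (L1 L2 L3 : List (Int × Int)) :
    Sifting3_alt L1 L2 L3 = pvJoin L1 L2 L3 := by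
  unfold Sifting3_alt pvJoin
  have hmid : ∀ (p1 : Int × Int) (acc : List (Int × Int × Int)),
      ((pvGroup L2).getD p1.1 []).foldl (fun acc mb =>
        ((pvGroup L3).getD p1.1 []).foldl (fun acc mc => acc ++ [(p1.2, mb, mc)]) acc) acc
      = acc ++ L2.flatMap (fun p2 =>
          if p1.1 = p2.1 then
            ((L3.filter (fun p => p.1 == p1.1)).map (·.2)).map (fun mc => (p1.2, p2.2, mc))
          else []) := by
    intro p1 acc
    rw [PySem.List.foldl_congr_mem ((pvGroup L2).getD p1.1 []) _
      (fun acc mb => acc ++ ((pvGroup L3).getD p1.1 []).map (fun mc => (p1.2, mb, mc))) acc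
      (fun acc mb _ => PySem.List.foldl_append_singleton_eq_map _ _ _),
      PySem.List.foldl_append_eq_flatMap, pvGroup_getD, pvGroup_getD,
      List.flatMap_map, pvFlatMap_filter]
    congr 1
    apply List.flatMap_congr
    intro p2 _
    by_cases h : p1.1 = p2.1
    · simp [h]
    · have h' : p2.1 ≠ p1.1 := fun e => h e.symm
      simp [h, h']
  rw [PySem.List.foldl_congr_mem L1 _
      (fun acc p1 => acc ++ L2.flatMap (fun p2 =>
        if p1.1 = p2.1 then
          ((L3.filter (fun p => p.1 == p1.1)).map (·.2)).map (fun mc => (p1.2, p2.2, mc))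
        else [])) []
      (fun acc p1 _ => hmid p1 acc), PySem.List.foldl_append_eq_flatMap, List.nil_append]

-- ===== VERDICT (by name: the statement is the Claim_ definition above) =====
theorem Sifting3_spec : Claim_equal_Sifting3 := by
  intro L1 L2 L3 _
  unfold Spec_Sifting3
  rw [Sifting3_eq_pvJoin, Sifting3_alt_eq_pvJoin]
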